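-- pv_equiv track=rewrite | github.com/JenishPraveenKumarG/product-based-company-DSA | stack-and-queue/nearest_smallest_element.py | nearest_small_element
-- ===== SOURCE A (Python) =====
-- def nearest_small_element(arr):
--     n = len(arr)
--     nse = [-1]*n
--     for i in range(n):
--         for j in range(i-1,-1,-1):
--             if arr[j] < arr[i]:
--                 nse[i] = arr[j]
--                 break
--     return nse
-- ===== SOURCE B (Python) =====
-- def nearest_small_element(arr):
--     # Monotonic (strictly increasing) stack, single left-to-right pass: O(n).
--     stack = []
--     res = []
--     for x in arr:
--         while stack and stack[-1] >= x:
--             stack.pop()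
--         res.append(stack[-1] if stack else -1)
--         stack.append(x)
--     return res
-- ===== Notes on version B (the rewrite author's own statement) =====
-- stated objective: faster
-- what changed: Replaced the quadratic backwards scan per index with a single left-to-right pass maintaining a monotonic stack of candidate smaller elements.
import Mathlib
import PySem

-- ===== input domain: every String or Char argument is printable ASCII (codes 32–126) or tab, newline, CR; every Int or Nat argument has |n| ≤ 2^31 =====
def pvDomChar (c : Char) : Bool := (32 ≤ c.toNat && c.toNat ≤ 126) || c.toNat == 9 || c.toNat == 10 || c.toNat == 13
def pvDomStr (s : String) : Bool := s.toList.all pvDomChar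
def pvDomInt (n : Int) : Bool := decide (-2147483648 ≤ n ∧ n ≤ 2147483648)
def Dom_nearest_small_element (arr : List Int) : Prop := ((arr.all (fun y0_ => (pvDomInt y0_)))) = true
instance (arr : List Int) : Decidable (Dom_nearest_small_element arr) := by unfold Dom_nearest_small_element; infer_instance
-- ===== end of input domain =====

-- B replaces A's quadratic per-index backwards scan by a single monotonic-stack pass (asymptotically faster).

-- ===== PORT A =====
-- inner loop: 'for j in range(i-1,-1,-1): if arr[j] < arr[i]: nse[i] = arr[j]; break'
-- (k = j+1 counts down; every index accessed is in range, so List.getD is exact for Python's arr[j])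
def aInner (arr : List Int) (x : Int) : Nat → Int
  | 0 => -1
  | k + 1 => if arr.getD k 0 < x then arr.getD k 0 else aInner arr x k

-- 'nse = [-1]*n; for i in range(n): <inner loop writes nse[i]>; return nse'
def nearest_small_element (arr : List Int) : List Int :=
  (List.range arr.length).map (fun i => aInner arr (arr.getD i 0) i)

-- ===== PORT B =====
-- 'while stack and stack[-1] >= x: stack.pop()'  (stack kept top-first)
def popGE (x : Int) : List Int → List Int
  | [] => []
  | t :: rest => if t ≥ x then popGE x rest else t :: rest

-- main loop: for each x, pop, record top (or -1), push x
def bLoop (stack : List Int) : List Int → List Int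
  | [] => []
  | x :: xs =>
    let s := popGE x stack
    (match s with | [] => -1 | t :: _ => t) :: bLoop (x :: s) xs

def nearest_small_element_alt (arr : List Int) : List Int := bLoop [] arr

-- ===== PRECONDITION & SPEC =====
def Spec_nearest_small_element (arr : List Int) (out : List Int) : Prop := out = nearest_small_element_alt arr
instance (arr : List Int) (out : List Int) : Decidable (Spec_nearest_small_element arr out) := by unfold Spec_nearest_small_element; infer_instance

-- ===== CLAIM (what is proved, stated in full; the proofs are below) =====
def Claim_equal_nearest_small_element : Prop := ∀ (arr : List Int), Dom_nearest_small_element arr → Spec_nearest_small_element arr (nearest_small_element arr)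

-- ===== LEMMAS AND PROOFS =====

-- reference form: process xs left to right, `pre` = already-seen elements, most recent first;
-- each output is the first element of `pre` smaller than the current one (or -1)
def specGo (pre : List Int) : List Int → List Int
  | [] => []
  | x :: xs => ((pre.find? (fun a => a < x)).getD (-1)) :: specGo (x :: pre) xs

-- A-side: the inner countdown scan over a prefix is find? on the reversed prefix
theorem aInner_eq_find (ys : List Int) : ∀ (zs : List Int) (x : Int),
    aInner (ys ++ zs) x ys.length = ((ys.reverse.find? (fun a => a < x)).getD (-1)) := by
  induction ys using List.reverseRecOn with
  | nil => intro zs x; simp [aInner]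
  | append_singleton ys z ih =>
    intro zs x
    have hlen : (ys ++ [z]).length = ys.length + 1 := by simp
    have hget : ((ys ++ [z]) ++ zs).getD ys.length 0 = z := by
      rw [List.append_assoc]
      simp [List.getD]
    rw [hlen]
    simp only [aInner]
    rw [hget]
    have hrec : aInner ((ys ++ [z]) ++ zs) x ys.length
        = ((ys.reverse.find? (fun a => a < x)).getD (-1)) := by
      rw [List.append_assoc]; exact ih ([z] ++ zs) x
    rw [hrec]
    by_cases h : z < x
    · simp [List.find?, h]
    · simp [List.find?, h]

-- specGo as a map over indices of take-prefixes
theorem specGo_eq_map (xs : List Int) : ∀ (pre : List Int),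
    specGo pre xs = (List.range xs.length).map
      (fun i => ((((xs.take i).reverse ++ pre).find? (fun a => a < xs.getD i 0)).getD (-1))) := by
  induction xs with
  | nil => intro pre; simp [specGo]
  | cons x xs ih =>
    intro pre
    simp only [specGo, List.length_cons, List.range_succ_eq_map, List.map_cons, List.map_map]
    rw [List.cons.injEq]
    constructor
    · simp
    · rw [ih (x :: pre)]
      apply List.map_congr_left
      intro i _
      simp [List.take_succ_cons, List.getD, List.find?_cons]
      by_cases hx : x < xs[i]?.getD 0 <;> simp [hx] <;> congr 1

-- A equals the reference form
theorem a_eq_specGo (arr : List Int) : nearest_small_element arr = specGo [] arr := by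
  rw [specGo_eq_map]
  unfold nearest_small_element
  apply List.map_congr_left
  intro i hi
  rw [List.mem_range] at hi
  have hsplit : arr = arr.take i ++ arr.drop i := (List.take_append_drop i arr).symm
  have hlen : (arr.take i).length = i := List.length_take_of_le (le_of_lt hi)
  generalize arr.getD i 0 = x
  have h := aInner_eq_find (arr.take i) (arr.drop i) x
  rw [hlen] at h
  rw [← hsplit] at h
  simpa using h

-- B-side: the popped-to element is the first stack element smaller than x
theorem popGE_head (x : Int) (stack : List Int) :
    (match popGE x stack with | [] => (-1 : Int) | t :: _ => t)
      = ((stack.find? (fun a => a < x)).getD (-1)) := by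
  induction stack with
  | nil => simp [popGE]
  | cons t rest ih =>
    by_cases h : t ≥ x
    · have hlt : ¬ (t < x) := not_lt.mpr h
      simp [popGE, h, hlt, ih]
    · have hlt : t < x := lt_of_not_ge h
      simp [popGE, h, List.find?, hlt]

-- popping elements ≥ x does not change find? for thresholds y ≤ x
theorem find?_popGE (x y : Int) (hyx : y ≤ x) (stack : List Int) :
    (popGE x stack).find? (fun a => a < y) = stack.find? (fun a => a < y) := by
  induction stack with
  | nil => simp [popGE]
  | cons t rest ih =>
    by_cases h : t ≥ x
    · have hlt : ¬ (t < y) := not_lt.mpr (le_trans hyx h)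
      simp [popGE, h, hlt, ih]
    · simp [popGE, h]

-- B equals the reference form, under the stack/prefix agreement invariant
theorem bLoop_eq_specGo (xs : List Int) : ∀ (stack pre : List Int),
    (∀ y : Int, stack.find? (fun a => a < y) = pre.find? (fun a => a < y)) →
    bLoop stack xs = specGo pre xs := by
  induction xs with
  | nil => intro stack pre _; simp [bLoop, specGo]
  | cons x xs ih =>
    intro stack pre hinv
    simp only [bLoop, specGo]
    rw [List.cons.injEq]
    constructor
    · rw [popGE_head, hinv]
    · apply ih
      intro y
      by_cases h : x < y
      · simp [List.find?, h]
      · have hyx : y ≤ x := le_of_not_gt h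
        simp only [List.find?, h, decide_false]
        rw [find?_popGE x y hyx, hinv]

-- ===== VERDICT (by name: the statement is the Claim_ definition above) =====
theorem nearest_small_element_spec : Claim_equal_nearest_small_element := by
  intro arr _
  show nearest_small_element arr = nearest_small_element_alt arr
  rw [a_eq_specGo]
  exact (bLoop_eq_specGo arr [] [] (fun y => rfl)).symm
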